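-- pv_equiv track=rewrite | github.com/nand32541works/GeekForGeeks.com | PTOD227.py | sumOfModes
-- ===== SOURCE A (Python) =====
-- from collections import defaultdict
--
-- def sumOfModes(arr, k):
--     freq = defaultdict(int)
--     count_map = defaultdict(set)
--     max_freq = 0
--     result = 0
--     for i in range(len(arr)):
--         num = arr[i]
--         prev_freq = freq[num]
--         freq[num] += 1
--         new_freq = freq[num]
--         if prev_freq > 0:
--             count_map[prev_freq].discard(num)
--             if not count_map[prev_freq]:
--                 del count_map[prev_freq]
--         count_map[new_freq].add(num)
--         max_freq = max(max_freq, new_freq)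
--         if i >= k:
--             out_num = arr[i - k]
--             out_freq = freq[out_num]
--             freq[out_num] -= 1
--             count_map[out_freq].discard(out_num)
--             if not count_map[out_freq]:
--                 del count_map[out_freq]
--             if freq[out_num] > 0:
--                 count_map[freq[out_num]].add(out_num)
--             else:
--                 del freq[out_num]
--             if max_freq not in count_map:
--                 max_freq = max(count_map.keys(), default=0)
--         if i >= k - 1:
--             result += min(count_map[max_freq])
--     return result
-- ===== SOURCE B (Python) =====
-- # B: recompute each window's mode directly from a per-window counter (no incremental
-- # freq/count_map/max_freq bookkeeping); simpler, not faster. For k <= 0 there are no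
-- # valid windows, so the sum is 0.
-- def window_mode(window):
--     counts = {}
--     for x in window:
--         counts[x] = counts.get(x, 0) + 1
--     m = max(counts.values())
--     return min(x for x in counts if counts[x] == m)
--
-- def sumOfModes(arr, k):
--     if k <= 0:
--         return 0
--     total = 0
--     for s in range(len(arr) - k + 1):
--         total += window_mode(arr[s:s+k])
--     return total
-- ===== Notes on version B (the rewrite author's own statement) =====
-- stated objective: simpler
-- what changed: Replaced A's incremental sliding-window state machine (freq dict, inverse count_map of sets, maintained max_freq with deletion repair) by a direct per-window recomputation: each window's counter is built from scratch and its mode (min key of max count) summed.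
import Mathlib
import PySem

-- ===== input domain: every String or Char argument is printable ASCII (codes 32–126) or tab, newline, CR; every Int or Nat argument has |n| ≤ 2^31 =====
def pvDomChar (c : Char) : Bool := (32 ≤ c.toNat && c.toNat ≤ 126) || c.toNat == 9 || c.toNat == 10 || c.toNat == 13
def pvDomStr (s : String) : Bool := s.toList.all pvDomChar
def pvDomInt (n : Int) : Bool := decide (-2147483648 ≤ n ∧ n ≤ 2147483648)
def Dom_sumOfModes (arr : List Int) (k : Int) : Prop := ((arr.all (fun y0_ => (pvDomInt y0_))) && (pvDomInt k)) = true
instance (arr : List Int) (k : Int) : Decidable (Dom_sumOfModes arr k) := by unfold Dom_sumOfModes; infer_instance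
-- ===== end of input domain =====

-- B replaces A's incremental sliding-window state machine by a direct per-window mode
-- recomputation (simpler, not faster); equivalence is proved on Pre_ (k ≥ 1, or empty arr).

-- ===== PORT A =====
-- count_map[ce].discard(e); if not count_map[ce]: del count_map[ce]
def cmDrop (cmap : PySem.Dict Int (PySem.Set Int)) (e ce : Int) : PySem.Dict Int (PySem.Set Int) :=
  let s := PySem.Set.discard (cmap.getD ce PySem.Set.empty) e
  if s.isEmpty then cmap.erase ce else cmap.insert ce s

-- count_map update when freq of e goes ce -> ce+1 (the add phase of A's loop body)
def cmBumpAdd (cmap : PySem.Dict Int (PySem.Set Int)) (e ce : Int) : PySem.Dict Int (PySem.Set Int) :=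
  let cmap1 := if ce > 0 then cmDrop cmap e ce else cmap
  cmap1.insert (ce + 1) (PySem.Set.add (cmap1.getD (ce + 1) PySem.Set.empty) e)

-- count_map update when freq of e goes ce -> ce-1 (the removal phase of A's loop body)
def cmBumpSub (cmap : PySem.Dict Int (PySem.Set Int)) (e ce : Int) : PySem.Dict Int (PySem.Set Int) :=
  let cmap1 := cmDrop cmap e ce
  if ce - 1 > 0 then cmap1.insert (ce - 1) (PySem.Set.add (cmap1.getD (ce - 1) PySem.Set.empty) e) else cmap1

-- one iteration of A's loop; state = (freq, count_map, max_freq, result)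
def sumOfModesStep (arr : List Int) (k : Int)
    (st : PySem.Dict Int Int × PySem.Dict Int (PySem.Set Int) × Int × Int) (i : Int) :
    PySem.Dict Int Int × PySem.Dict Int (PySem.Set Int) × Int × Int :=
  let num := PySem.List.pyGetD arr i 0          -- arr[i], always in range in this loop
  let prevf := st.1.getD num 0
  let freq := st.1.insert num (prevf + 1)
  let cmap := cmBumpAdd st.2.1 num prevf
  let maxf := max st.2.2.1 (prevf + 1)
  let st2 :=
    if i ≥ k then
      let outn := PySem.List.pyGetD arr (i - k) 0   -- arr[i-k]; out of range only outside Pre_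
      let outf := freq.getD outn 0
      let freq2 := if outf - 1 > 0 then freq.insert outn (outf - 1)
                   else (freq.insert outn (outf - 1)).erase outn   -- freq[outn] -= 1; del if ≤ 0
      let cmap2 := cmBumpSub cmap outn outf
      let maxf2 := if cmap2.contains maxf then maxf else PySem.List.maxD cmap2.keys (fun f => f) 0
      (freq2, cmap2, maxf2)
    else (freq, cmap, maxf)
  let res :=
    if i ≥ k - 1 then
      -- min(count_map[max_freq]); none = ValueError on an empty set, reachable only outside Pre_
      st.2.2.2 + (PySem.List.min? (st2.2.1.getD st2.2.2 PySem.Set.empty) (fun x => x)).getD 0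
    else st.2.2.2
  (st2.1, st2.2.1, st2.2.2, res)

def sumOfModes (arr : List Int) (k : Int) : Int :=
  ((PySem.List.pyRange 0 (arr.length : Int) 1).foldl (sumOfModesStep arr k)
    (PySem.Dict.empty, PySem.Dict.empty, 0, 0)).2.2.2

-- ===== PORT B =====
-- mode of one window: counter dict, max count, min key attaining it
def windowMode (w : List Int) : Int :=
  let c : PySem.Dict Int Int := w.foldl (fun d x => d.insert x (d.getD x 0 + 1)) PySem.Dict.empty
  let m := (PySem.List.max? c.values (fun v => v)).getD 0    -- none = ValueError on an empty window, only outside Pre_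
  (PySem.List.min? (c.keys.filter (fun x => c.getD x 0 == m)) (fun x => x)).getD 0

def sumOfModes_alt (arr : List Int) (k : Int) : Int :=
  if k ≤ 0 then 0
  else
    (PySem.List.pyRange 0 ((arr.length : Int) - k + 1) 1).foldl
      (fun total s => total + windowMode (PySem.List.slice arr (some s) (some (s + k)))) 0

-- ===== PRECONDITION & SPEC =====
-- Pre_ excludes exactly the inputs on which A raises: k ≤ 0 together with a non-empty arr.
def Pre_sumOfModes (arr : List Int) (k : Int) : Prop := arr = [] ∨ 1 ≤ k
instance (arr : List Int) (k : Int) : Decidable (Pre_sumOfModes arr k) := by unfold Pre_sumOfModes; infer_instance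
def pvWitness_sumOfModes : List Int × Int := ([1, 2, 2, 1, 2], 3)

def Spec_sumOfModes (arr : List Int) (k : Int) (out : Int) : Prop := out = sumOfModes_alt arr k
instance (arr : List Int) (k : Int) (out : Int) : Decidable (Spec_sumOfModes arr k out) := by unfold Spec_sumOfModes; infer_instance

-- ===== CLAIM (what is proved, stated in full; the proofs are below) =====
def Claim_equal_sumOfModes : Prop := ∀ (arr : List Int) (k : Int), Dom_sumOfModes arr k → Pre_sumOfModes arr k → Spec_sumOfModes arr k (sumOfModes arr k)

-- ===== LEMMAS AND PROOFS =====

-- `del d[c]` (erase) lemmas for the Int-keyed dicts of these ports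
theorem find?_filter_ne {ν : Type} (items : List (Int × ν)) (c c' : Int) :
    (items.filter (fun p => !p.1 == c)).find? (fun p => p.1 == c') =
      if c' = c then none else items.find? (fun p => p.1 == c') := by
  induction items with
  | nil => simp
  | cons hd tl ih =>
      rw [List.filter_cons]
      by_cases h1 : hd.1 = c
      · have hb : (!hd.1 == c) = false := by simp [h1]
        rw [hb]
        simp only [Bool.false_eq_true, if_false]
        rw [ih]
        by_cases h2 : c' = c
        · simp [h2]
        · have hb2 : (hd.1 == c') = false := by
            simp only [beq_eq_false_iff_ne, ne_eq, h1]
            intro hh; exact h2 hh.symm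
          rw [if_neg h2, if_neg h2, List.find?_cons, hb2]
      · have hb : (!hd.1 == c) = true := by simp [h1]
        rw [hb]
        simp only [if_true]
        rw [List.find?_cons, List.find?_cons]
        by_cases h3 : hd.1 = c'
        · have hb2 : (hd.1 == c') = true := by simp [h3]
          rw [hb2]
          have hcc : ¬ c' = c := by intro h2; exact h1 (h3.trans h2)
          simp [hcc]
        · have hb2 : (hd.1 == c') = false := by simp [h3]
          rw [hb2]
          simp only [Bool.false_eq_true, if_false]
          exact ih

theorem dict_get?_erase {ν : Type} (d : PySem.Dict Int ν) (c c' : Int) :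
    (d.erase c).get? c' = if c' = c then none else d.get? c' := by
  obtain ⟨items⟩ := d
  simp only [PySem.Dict.erase, PySem.Dict.get?]
  rw [find?_filter_ne]
  by_cases h : c' = c <;> simp [h]

theorem dict_getD_erase {ν : Type} (d : PySem.Dict Int ν) (c c' : Int) (d0 : ν) :
    (d.erase c).getD c' d0 = if c' = c then d0 else d.getD c' d0 := by
  rw [PySem.Dict.getD_eq_get?_getD, dict_get?_erase]
  by_cases h : c' = c <;> simp [h, PySem.Dict.getD_eq_get?_getD]

theorem dict_contains_erase {ν : Type} (d : PySem.Dict Int ν) (c c' : Int) :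
    ((d.erase c).contains c' = true) ↔ (c' ≠ c ∧ d.contains c' = true) := by
  rw [PySem.Dict.contains_eq_isSome_get?, dict_get?_erase, PySem.Dict.contains_eq_isSome_get?]
  by_cases h : c' = c <;> simp [h]

theorem set_mem_discard (s : PySem.Set Int) (e x : Int) :
    x ∈ PySem.Set.discard s e ↔ x ∈ s ∧ x ≠ e := by
  simp [PySem.Set.discard, List.mem_filter]

-- window of the first p elements: the last (at most) kn of arr.take p
def pvWin (arr : List Int) (kn p : Nat) : List Int := (arr.take p).drop (p - kn)

-- functional contents of count_map relative to a count function g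
def CmapOK (cmap : PySem.Dict Int (PySem.Set Int)) (g : Int → Int) : Prop :=
  (∀ f x : Int, x ∈ cmap.getD f PySem.Set.empty ↔ (1 ≤ f ∧ g x = f)) ∧
  (∀ f : Int, cmap.contains f = true ↔ (1 ≤ f ∧ ∃ x, g x = f))

theorem cmapOK_congr {cmap : PySem.Dict Int (PySem.Set Int)} {g g' : Int → Int}
    (h : CmapOK cmap g) (hg : ∀ x, g x = g' x) : CmapOK cmap g' := by
  obtain ⟨h1, h2⟩ := h
  constructor
  · intro f x; rw [h1 f x, hg x]
  · intro f; rw [h2 f]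
    constructor
    · rintro ⟨hf, x, hx⟩; exact ⟨hf, x, by rw [← hg x]; exact hx⟩
    · rintro ⟨hf, x, hx⟩; exact ⟨hf, x, by rw [hg x]; exact hx⟩

theorem cmDrop_mem {cmap : PySem.Dict Int (PySem.Set Int)} {g : Int → Int}
    (hok : CmapOK cmap g) (e ce : Int) :
    ∀ f x : Int, x ∈ (cmDrop cmap e ce).getD f PySem.Set.empty ↔
      (1 ≤ f ∧ g x = f ∧ ¬(f = ce ∧ x = e)) := by
  obtain ⟨h1, h2⟩ := hok
  intro f x
  simp only [cmDrop]
  by_cases hemp : (PySem.Set.discard (cmap.getD ce PySem.Set.empty) e).isEmpty = true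
  · rw [if_pos hemp, dict_getD_erase]
    have hnil : PySem.Set.discard (cmap.getD ce PySem.Set.empty) e = [] :=
      List.isEmpty_iff.mp hemp
    by_cases hf : f = ce
    · rw [if_pos hf]
      constructor
      · intro hx; exact absurd hx (List.not_mem_nil)
      · rintro ⟨hf1, hgx, hne⟩
        have hxe : x ≠ e := fun h => hne ⟨hf, h⟩
        have hmem : x ∈ PySem.Set.discard (cmap.getD ce PySem.Set.empty) e :=
          (set_mem_discard _ _ _).mpr ⟨(h1 ce x).mpr ⟨by omega, by omega⟩, hxe⟩
        rw [hnil] at hmem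
        exact absurd hmem (List.not_mem_nil)
    · rw [if_neg hf, h1 f x]
      constructor
      · rintro ⟨hf1, hgx⟩; exact ⟨hf1, hgx, by rintro ⟨hfe, _⟩; exact hf hfe⟩
      · rintro ⟨hf1, hgx, _⟩; exact ⟨hf1, hgx⟩
  · rw [if_neg hemp, PySem.Dict.getD_insert]
    by_cases hf : f = ce
    · rw [if_pos hf, set_mem_discard, h1 ce x]
      constructor
      · rintro ⟨⟨hf1, hgx⟩, hxe⟩; exact ⟨by omega, by omega, by rintro ⟨_, h⟩; exact hxe h⟩
      · rintro ⟨hf1, hgx, hne⟩; exact ⟨⟨by omega, by omega⟩, fun h => hne ⟨hf, h⟩⟩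
    · rw [if_neg hf, h1 f x]
      constructor
      · rintro ⟨hf1, hgx⟩; exact ⟨hf1, hgx, by rintro ⟨hfe, _⟩; exact hf hfe⟩
      · rintro ⟨hf1, hgx, _⟩; exact ⟨hf1, hgx⟩

theorem cmDrop_contains {cmap : PySem.Dict Int (PySem.Set Int)} {g : Int → Int}
    (hok : CmapOK cmap g) (e ce : Int) :
    ∀ f : Int, (cmDrop cmap e ce).contains f = true ↔
      (1 ≤ f ∧ ∃ x, g x = f ∧ ¬(f = ce ∧ x = e)) := by
  obtain ⟨h1, h2⟩ := hok
  intro f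
  simp only [cmDrop]
  by_cases hemp : (PySem.Set.discard (cmap.getD ce PySem.Set.empty) e).isEmpty = true
  · rw [if_pos hemp, dict_contains_erase]
    have hnil : PySem.Set.discard (cmap.getD ce PySem.Set.empty) e = [] :=
      List.isEmpty_iff.mp hemp
    by_cases hf : f = ce
    · constructor
      · rintro ⟨hne, _⟩; exact absurd hf hne
      · rintro ⟨hf1, x, hgx, hne⟩
        have hxe : x ≠ e := fun h => hne ⟨hf, h⟩
        have hmem : x ∈ PySem.Set.discard (cmap.getD ce PySem.Set.empty) e :=
          (set_mem_discard _ _ _).mpr ⟨(h1 ce x).mpr ⟨by omega, by omega⟩, hxe⟩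
        rw [hnil] at hmem
        exact absurd hmem (List.not_mem_nil)
    · rw [h2 f]
      constructor
      · rintro ⟨_, hf1, x, hgx⟩; exact ⟨hf1, x, hgx, by rintro ⟨hfe, _⟩; exact hf hfe⟩
      · rintro ⟨hf1, x, hgx, _⟩; exact ⟨hf, hf1, x, hgx⟩
  · rw [if_neg hemp, PySem.Dict.contains_insert]
    simp only [Bool.or_eq_true, beq_iff_eq]
    by_cases hf : f = ce
    · constructor
      · intro _
        have hnn : PySem.Set.discard (cmap.getD ce PySem.Set.empty) e ≠ [] :=
          fun h => hemp (by rw [h]; rfl)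
        obtain ⟨x, hx⟩ := List.exists_mem_of_ne_nil _ hnn
        obtain ⟨hxs, hxe⟩ := (set_mem_discard _ _ _).mp hx
        obtain ⟨hf1, hgx⟩ := (h1 ce x).mp hxs
        exact ⟨by omega, x, by omega, by rintro ⟨_, h⟩; exact hxe h⟩
      · intro _; exact Or.inl hf
    · rw [h2 f]
      constructor
      · rintro (hfe | ⟨hf1, x, hgx⟩)
        · exact absurd hfe hf
        · exact ⟨hf1, x, hgx, by rintro ⟨hfe, _⟩; exact hf hfe⟩
      · rintro ⟨hf1, x, hgx, _⟩; exact Or.inr ⟨hf1, x, hgx⟩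

theorem bumpAdd_core (cm1 : PySem.Dict Int (PySem.Set Int)) (g : Int → Int) (e : Int)
    (hge : 0 ≤ g e)
    (hU1 : ∀ f x : Int, x ∈ cm1.getD f PySem.Set.empty ↔ (1 ≤ f ∧ g x = f ∧ ¬(f = g e ∧ x = e)))
    (hU2 : ∀ f : Int, cm1.contains f = true ↔ (1 ≤ f ∧ ∃ x, g x = f ∧ ¬(f = g e ∧ x = e))) :
    CmapOK (cm1.insert (g e + 1) (PySem.Set.add (cm1.getD (g e + 1) PySem.Set.empty) e))
      (fun x => if x = e then g e + 1 else g x) := by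
  unfold CmapOK
  constructor
  · intro f x
    dsimp only
    rw [PySem.Dict.getD_insert]
    by_cases hf : f = g e + 1
    · rw [if_pos hf, PySem.Set.mem_add, hU1 (g e + 1) x]
      by_cases hx : x = e
      · rw [if_pos hx]
        constructor
        · intro _; exact ⟨by omega, by omega⟩
        · intro _; exact Or.inr hx
      · rw [if_neg hx]
        constructor
        · rintro (⟨hf1, hgx, _⟩ | hxe)
          · exact ⟨by omega, by omega⟩
          · exact absurd hxe hx
        · rintro ⟨hf1, hgx⟩
          exact Or.inl ⟨by omega, by omega, by rintro ⟨hfe, _⟩; omega⟩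
    · rw [if_neg hf, hU1 f x]
      by_cases hx : x = e
      · rw [if_pos hx]
        constructor
        · rintro ⟨hf1, hgx, hne⟩
          rw [hx] at hgx
          exact absurd ⟨by omega, hx⟩ hne
        · rintro ⟨_, hfe⟩; exact absurd hfe.symm hf
      · rw [if_neg hx]
        constructor
        · rintro ⟨hf1, hgx, _⟩; exact ⟨hf1, hgx⟩
        · rintro ⟨hf1, hgx⟩; exact ⟨hf1, hgx, by rintro ⟨_, hxe⟩; exact hx hxe⟩
  · intro f
    dsimp only
    rw [PySem.Dict.contains_insert]
    simp only [Bool.or_eq_true, beq_iff_eq]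
    rw [hU2 f]
    by_cases hf : f = g e + 1
    · constructor
      · intro _; refine ⟨by omega, e, ?_⟩; rw [if_pos rfl]; omega
      · intro _; exact Or.inl hf
    · constructor
      · rintro (hfe | ⟨hf1, x, hgx, hne⟩)
        · exact absurd hfe hf
        · by_cases hx : x = e
          · rw [hx] at hgx; exact absurd ⟨by omega, hx⟩ hne
          · exact ⟨hf1, x, by rw [if_neg hx]; exact hgx⟩
      · rintro ⟨hf1, x, hx⟩
        by_cases hxe : x = e
        · rw [if_pos hxe] at hx; exact absurd hx.symm hf
        · rw [if_neg hxe] at hx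
          exact Or.inr ⟨hf1, x, hx, by rintro ⟨_, h⟩; exact hxe h⟩

theorem bumpAdd_ok {cmap : PySem.Dict Int (PySem.Set Int)} {g : Int → Int} {e : Int}
    (hok : CmapOK cmap g) (hge : 0 ≤ g e) :
    CmapOK (cmBumpAdd cmap e (g e)) (fun x => if x = e then g e + 1 else g x) := by
  simp only [cmBumpAdd]
  by_cases hc : g e > 0
  · rw [if_pos hc]
    exact bumpAdd_core _ g e hge (cmDrop_mem hok e (g e)) (cmDrop_contains hok e (g e))
  · rw [if_neg hc]
    obtain ⟨h1, h2⟩ := hok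
    refine bumpAdd_core _ g e hge ?_ ?_
    · intro f x
      rw [h1 f x]
      constructor
      · rintro ⟨hf1, hgx⟩; exact ⟨hf1, hgx, by rintro ⟨hfe, _⟩; omega⟩
      · rintro ⟨hf1, hgx, _⟩; exact ⟨hf1, hgx⟩
    · intro f
      rw [h2 f]
      constructor
      · rintro ⟨hf1, x, hgx⟩; exact ⟨hf1, x, hgx, by rintro ⟨hfe, _⟩; omega⟩
      · rintro ⟨hf1, x, hgx, _⟩; exact ⟨hf1, x, hgx⟩

theorem bumpSub_ok {cmap : PySem.Dict Int (PySem.Set Int)} {g : Int → Int} {e : Int}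
    (hok : CmapOK cmap g) (hge : 1 ≤ g e) :
    CmapOK (cmBumpSub cmap e (g e)) (fun x => if x = e then g e - 1 else g x) := by
  simp only [cmBumpSub]
  have hD1 := cmDrop_mem hok e (g e)
  have hD2 := cmDrop_contains hok e (g e)
  by_cases hc : g e - 1 > 0
  · rw [if_pos hc]
    unfold CmapOK
    constructor
    · intro f x
      dsimp only
      rw [PySem.Dict.getD_insert]
      by_cases hf : f = g e - 1
      · rw [if_pos hf, PySem.Set.mem_add, hD1 (g e - 1) x]
        by_cases hx : x = e
        · rw [if_pos hx]
          constructor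
          · intro _; exact ⟨by omega, by omega⟩
          · intro _; exact Or.inr hx
        · rw [if_neg hx]
          constructor
          · rintro (⟨hf1, hgx, _⟩ | hxe)
            · exact ⟨by omega, by omega⟩
            · exact absurd hxe hx
          · rintro ⟨hf1, hgx⟩
            exact Or.inl ⟨by omega, by omega, by rintro ⟨hfe, _⟩; omega⟩
      · rw [if_neg hf, hD1 f x]
        by_cases hx : x = e
        · rw [if_pos hx]
          constructor
          · rintro ⟨hf1, hgx, hne⟩
            rw [hx] at hgx
            exact absurd ⟨by omega, hx⟩ hne
          · rintro ⟨_, hfe⟩; exact absurd hfe.symm hf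
        · rw [if_neg hx]
          constructor
          · rintro ⟨hf1, hgx, _⟩; exact ⟨hf1, hgx⟩
          · rintro ⟨hf1, hgx⟩; exact ⟨hf1, hgx, by rintro ⟨_, hxe⟩; exact hx hxe⟩
    · intro f
      dsimp only
      rw [PySem.Dict.contains_insert]
      simp only [Bool.or_eq_true, beq_iff_eq]
      rw [hD2 f]
      by_cases hf : f = g e - 1
      · constructor
        · intro _; refine ⟨by omega, e, ?_⟩; rw [if_pos rfl]; omega
        · intro _; exact Or.inl hf
      · constructor
        · rintro (hfe | ⟨hf1, x, hgx, hne⟩)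
          · exact absurd hfe hf
          · by_cases hx : x = e
            · rw [hx] at hgx; exact absurd ⟨by omega, hx⟩ hne
            · exact ⟨hf1, x, by rw [if_neg hx]; exact hgx⟩
        · rintro ⟨hf1, x, hx⟩
          by_cases hxe : x = e
          · rw [if_pos hxe] at hx; exact absurd hx.symm hf
          · rw [if_neg hxe] at hx
            exact Or.inr ⟨hf1, x, hx, by rintro ⟨_, h⟩; exact hxe h⟩
  · rw [if_neg hc]
    unfold CmapOK
    constructor
    · intro f x
      dsimp only
      rw [hD1 f x]
      by_cases hx : x = e
      · rw [if_pos hx]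
        constructor
        · rintro ⟨hf1, hgx, hne⟩
          rw [hx] at hgx
          exact absurd ⟨by omega, hx⟩ hne
        · rintro ⟨hf1, hfe⟩; exact absurd hfe (by omega)
      · rw [if_neg hx]
        constructor
        · rintro ⟨hf1, hgx, _⟩; exact ⟨hf1, hgx⟩
        · rintro ⟨hf1, hgx⟩; exact ⟨hf1, hgx, by rintro ⟨_, hxe⟩; exact hx hxe⟩
    · intro f
      dsimp only
      rw [hD2 f]
      constructor
      · rintro ⟨hf1, x, hgx, hne⟩
        by_cases hx : x = e
        · rw [hx] at hgx; exact absurd ⟨by omega, hx⟩ hne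
        · exact ⟨hf1, x, by rw [if_neg hx]; exact hgx⟩
      · rintro ⟨hf1, x, hx⟩
        by_cases hxe : x = e
        · rw [if_pos hxe] at hx; exact absurd hx (by omega)
        · rw [if_neg hxe] at hx
          exact ⟨hf1, x, hx, by rintro ⟨_, h⟩; exact hxe h⟩

-- B's per-window value, characterised: the minimal element attaining the maximal count
theorem windowMode_eq (w : List Int) (mf m : Int)
    (hmax : ∀ y : Int, (w.count y : Int) ≤ mf)
    (hm : (w.count m : Int) = mf) (hm1 : 1 ≤ mf)
    (hmin : ∀ y ∈ w, (w.count y : Int) = mf → m ≤ y) :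
    windowMode w = m := by
  have hmemw : m ∈ w := by
    have : 0 < w.count m := by omega
    exact List.count_pos_iff.mp this
  simp only [windowMode, PySem.Dict.foldl_insert_getD_add_one_eq_counter]
  have hvals : (PySem.Dict.counter w).values = (PySem.Set.ofList w).map (fun x => (w.count x : Int)) := by
    simp [PySem.Dict.values, PySem.Dict.items_counter w, List.map_map, Function.comp_def]
  have hmemofl : m ∈ PySem.Set.ofList w := (PySem.Set.mem_ofList w m).mpr hmemw
  have hmfv : (w.count m : Int) ∈ (PySem.Set.ofList w).map (fun x => (w.count x : Int)) :=
    List.mem_map_of_mem hmemofl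
  obtain ⟨mv, hmv⟩ : ∃ mv, PySem.List.max? ((PySem.Set.ofList w).map (fun x => (w.count x : Int))) (fun v => v) = some mv := by
    cases hcase : PySem.List.max? ((PySem.Set.ofList w).map (fun x => (w.count x : Int))) (fun v => v) with
    | none =>
        have hnil := (PySem.List.max?_eq_none_iff _ _).mp hcase
        rw [hnil] at hmfv
        exact absurd hmfv (List.not_mem_nil)
    | some mv => exact ⟨mv, rfl⟩
  have hmveq : mv = mf := by
    have hmem := PySem.List.max?_mem hmv
    obtain ⟨x, _, hxe⟩ := List.mem_map.mp hmem
    have h1 : mv ≤ mf := by rw [← hxe]; exact hmax x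
    have h2 : mf ≤ mv := by
      have := PySem.List.max?_isMax hmv _ hmfv
      simpa [hm] using this
    omega
  rw [hvals, hmv, hmveq]
  simp only [Option.getD_some]
  have hlst : ∀ x : Int, x ∈ (PySem.Dict.counter w).keys.filter (fun x => (PySem.Dict.counter w).getD x 0 == mf) ↔ (x ∈ w ∧ (w.count x : Int) = mf) := by
    intro x
    rw [List.mem_filter, PySem.Dict.keys_counter, PySem.Set.mem_ofList, PySem.Dict.getD_counter]
    simp [beq_iff_eq]
  have hm_in : m ∈ (PySem.Dict.counter w).keys.filter (fun x => (PySem.Dict.counter w).getD x 0 == mf) :=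
    (hlst m).mpr ⟨hmemw, hm⟩
  obtain ⟨mm, hmm⟩ : ∃ mm, PySem.List.min? ((PySem.Dict.counter w).keys.filter (fun x => (PySem.Dict.counter w).getD x 0 == mf)) (fun x => x) = some mm := by
    cases hcase : PySem.List.min? ((PySem.Dict.counter w).keys.filter (fun x => (PySem.Dict.counter w).getD x 0 == mf)) (fun x => x) with
    | none =>
        have hnil := (PySem.List.min?_eq_none_iff _ _).mp hcase
        rw [hnil] at hm_in
        exact absurd hm_in (List.not_mem_nil)
    | some mm => exact ⟨mm, rfl⟩
  rw [hmm]
  simp only [Option.getD_some]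
  obtain ⟨hmmw, hmmc⟩ := (hlst mm).mp (PySem.List.min?_mem hmm)
  have h4 : m ≤ mm := hmin mm hmmw hmmc
  have h5 : mm ≤ m := PySem.List.min?_isMin hmm m hm_in
  omega

-- fixing up max_freq after a removal
theorem maxf_fix (cmapF : PySem.Dict Int (PySem.Set Int)) (W' : List Int) (maxf1 : Int)
    (hOK : CmapOK cmapF (fun x => (W'.count x : Int)))
    (hub : ∀ x : Int, (W'.count x : Int) ≤ maxf1) (hne : W' ≠ []) :
    (∀ x : Int, (W'.count x : Int) ≤ (if cmapF.contains maxf1 = true then maxf1 else PySem.List.maxD cmapF.keys (fun f => f) 0)) ∧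
    (∃ x : Int, (W'.count x : Int) = (if cmapF.contains maxf1 = true then maxf1 else PySem.List.maxD cmapF.keys (fun f => f) 0)) := by
  obtain ⟨x₀, hx₀⟩ := List.exists_mem_of_ne_nil W' hne
  have hx₀c : 0 < W'.count x₀ := List.count_pos_iff.mpr hx₀
  by_cases hcont : cmapF.contains maxf1 = true
  · rw [if_pos hcont]
    obtain ⟨_, x, hx⟩ := (hOK.2 maxf1).mp hcont
    exact ⟨hub, x, hx⟩
  · rw [if_neg hcont]
    have hc0 : cmapF.contains ((W'.count x₀ : Int)) = true :=
      (hOK.2 _).mpr ⟨by omega, x₀, rfl⟩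
    have hk0 : ((W'.count x₀ : Int)) ∈ cmapF.keys :=
      (PySem.Dict.contains_iff_mem_keys _ _).mp hc0
    obtain ⟨u, hu⟩ : ∃ u, PySem.List.max? cmapF.keys (fun f => f) = some u := by
      cases hcase : PySem.List.max? cmapF.keys (fun f => f) with
      | none =>
          have hnil := (PySem.List.max?_eq_none_iff _ _).mp hcase
          rw [hnil] at hk0
          exact absurd hk0 (List.not_mem_nil)
      | some u => exact ⟨u, rfl⟩
    have hukey : u ∈ cmapF.keys := PySem.List.max?_mem hu
    have hucont : cmapF.contains u = true := (PySem.Dict.contains_iff_mem_keys _ _).mpr hukey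
    obtain ⟨hu1, xu, hxu⟩ := (hOK.2 u).mp hucont
    simp only [PySem.List.maxD, hu, Option.getD_some]
    constructor
    · intro x
      by_cases hx : 1 ≤ (W'.count x : Int)
      · have hcx : cmapF.contains ((W'.count x : Int)) = true := (hOK.2 _).mpr ⟨hx, x, rfl⟩
        have hkx := (PySem.Dict.contains_iff_mem_keys _ _).mp hcx
        exact PySem.List.max?_isMax hu _ hkx
      · omega
    · exact ⟨xu, hxu⟩

-- appending the newly completed window to the result sum
theorem result_ext (arr : List Int) (kn p : Nat) (cmapF : PySem.Dict Int (PySem.Set Int))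
    (MF oldres : Int)
    (hOK : CmapOK cmapF (fun x => ((pvWin arr kn (p+1)).count x : Int)))
    (hub : ∀ x : Int, ((pvWin arr kn (p+1)).count x : Int) ≤ MF)
    (hat : ∃ x : Int, ((pvWin arr kn (p+1)).count x : Int) = MF)
    (hne : pvWin arr kn (p+1) ≠ [])
    (hkp : kn ≤ p + 1)
    (hold : oldres = ((List.range (p + 1 - kn)).map (fun s => windowMode ((arr.take (s + kn)).drop s))).sum) :
    oldres + (PySem.List.min? (cmapF.getD MF PySem.Set.empty) (fun x => x)).getD 0
      = ((List.range (p + 1 + 1 - kn)).map (fun s => windowMode ((arr.take (s + kn)).drop s))).sum := by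
  obtain ⟨x₀, hx₀⟩ := List.exists_mem_of_ne_nil _ hne
  have hx₀c : 0 < (pvWin arr kn (p+1)).count x₀ := List.count_pos_iff.mpr hx₀
  have hmf1 : 1 ≤ MF := by have := hub x₀; omega
  have hSmem : ∀ x : Int, x ∈ cmapF.getD MF PySem.Set.empty ↔ ((pvWin arr kn (p+1)).count x : Int) = MF := by
    intro x
    rw [hOK.1 MF x]
    constructor
    · rintro ⟨_, h⟩; exact h
    · intro h; exact ⟨hmf1, h⟩
  obtain ⟨xa, hxa⟩ := hat
  have hmemS : xa ∈ cmapF.getD MF PySem.Set.empty := (hSmem xa).mpr hxa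
  obtain ⟨mm, hmm⟩ : ∃ mm, PySem.List.min? (cmapF.getD MF PySem.Set.empty) (fun x => x) = some mm := by
    cases hcase : PySem.List.min? (cmapF.getD MF PySem.Set.empty) (fun x => x) with
    | none =>
        have hnil := (PySem.List.min?_eq_none_iff _ _).mp hcase
        rw [hnil] at hmemS
        exact absurd hmemS (List.not_mem_nil)
    | some mm => exact ⟨mm, rfl⟩
  have hwm : windowMode (pvWin arr kn (p+1)) = mm := by
    refine windowMode_eq _ MF mm hub ((hSmem mm).mp (PySem.List.min?_mem hmm)) hmf1 ?_
    intro y hy hyc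
    exact PySem.List.min?_isMin hmm y ((hSmem y).mpr hyc)
  rw [hmm, Option.getD_some, hold]
  rw [show p + 1 + 1 - kn = (p + 1 - kn) + 1 by omega, List.range_succ, List.map_append,
    List.sum_append, List.map_singleton, List.sum_singleton]
  rw [show p + 1 - kn + kn = p + 1 by omega]
  rw [show (arr.take (p+1)).drop (p + 1 - kn) = pvWin arr kn (p+1) from rfl, hwm]

-- window bookkeeping
theorem pvWin_ne_nil (arr : List Int) (kn p : Nat) (h1 : 1 ≤ kn) (h2 : 1 ≤ p)
    (h3 : p ≤ arr.length) : pvWin arr kn p ≠ [] := by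
  unfold pvWin
  intro hnil
  have hlen := congrArg List.length hnil
  simp only [List.length_drop, List.length_take, List.length_nil] at hlen
  omega

theorem pvWin_succ_lt (arr : List Int) (kn p : Nat) (h1 : p < kn) (hp : p < arr.length) :
    pvWin arr kn (p+1) = pvWin arr kn p ++ [arr.getD p 0] := by
  unfold pvWin
  rw [show p + 1 - kn = 0 by omega, show p - kn = 0 by omega]
  simp only [List.drop_zero]
  rw [List.take_succ, List.getElem?_eq_getElem hp, List.getD_eq_getElem arr 0 hp]
  rfl

theorem pvWin_succ_ge (arr : List Int) (kn p : Nat) (h1 : 1 ≤ kn) (h2 : kn ≤ p)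
    (hp : p < arr.length) :
    arr.getD (p - kn) 0 :: pvWin arr kn (p+1) = pvWin arr kn p ++ [arr.getD p 0] := by
  unfold pvWin
  have hlen : p - kn < (arr.take (p+1)).length := by
    simp only [List.length_take]
    omega
  have hidx : p - kn < arr.length := by omega
  have e2 : (arr.take (p+1))[p - kn]'hlen = arr[p - kn]'hidx := List.getElem_take
  calc arr.getD (p - kn) 0 :: (arr.take (p+1)).drop (p + 1 - kn)
      = (arr.take (p+1)).drop (p - kn) := by
        rw [show p + 1 - kn = (p - kn) + 1 by omega, List.drop_eq_getElem_cons hlen]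
        rw [e2, List.getD_eq_getElem arr 0 hidx]
    _ = (arr.take p ++ [arr[p]'hp]).drop (p - kn) := by
        rw [List.take_succ, List.getElem?_eq_getElem hp]
        rfl
    _ = (arr.take p).drop (p - kn) ++ [arr[p]'hp] := by
        refine List.drop_append_of_le_length ?_
        simp only [List.length_take]
        omega
    _ = (arr.take p).drop (p - kn) ++ [arr.getD p 0] := by
        rw [List.getD_eq_getElem arr 0 hp]

theorem pvWin_head_mem (arr : List Int) (kn p : Nat) (h1 : 1 ≤ kn) (h2 : kn ≤ p)
    (hp : p ≤ arr.length) (hp1 : 1 ≤ p) :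
    arr.getD (p - kn) 0 ∈ pvWin arr kn p := by
  unfold pvWin
  have hlen : p - kn < (arr.take p).length := by
    simp only [List.length_take]
    omega
  have hidx : p - kn < arr.length := by omega
  have e2 : (arr.take p)[p - kn]'hlen = arr[p - kn]'hidx := List.getElem_take
  rw [List.drop_eq_getElem_cons hlen, e2, ← List.getD_eq_getElem arr 0 hidx]
  exact List.mem_cons_self

-- A's loop invariant after p processed elements
def InvA (arr : List Int) (k : Int) (p : Nat)
    (st : PySem.Dict Int Int × PySem.Dict Int (PySem.Set Int) × Int × Int) : Prop :=
  (∀ x : Int, st.1.getD x 0 = ((pvWin arr k.toNat p).count x : Int)) ∧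
  CmapOK st.2.1 (fun x => ((pvWin arr k.toNat p).count x : Int)) ∧
  (∀ x : Int, ((pvWin arr k.toNat p).count x : Int) ≤ st.2.2.1) ∧
  (0 < p → ∃ x : Int, ((pvWin arr k.toNat p).count x : Int) = st.2.2.1) ∧
  (p = 0 → st.2.2.1 = 0) ∧
  st.2.2.2 = ((List.range (p + 1 - k.toNat)).map (fun s => windowMode ((arr.take (s + k.toNat)).drop s))).sum

theorem inv_init (arr : List Int) (k : Int) (hk : 1 ≤ k) :
    InvA arr k 0 (PySem.Dict.empty, PySem.Dict.empty, 0, 0) := by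
  have hw : pvWin arr k.toNat 0 = [] := by unfold pvWin; simp
  unfold InvA
  refine ⟨?_, ⟨?_, ?_⟩, ?_, ?_, ?_, ?_⟩
  · intro x
    rw [hw]
    simp [PySem.Dict.getD_empty]
  · intro f x
    rw [hw]
    constructor
    · intro hmem
      rw [PySem.Dict.getD_empty] at hmem
      exact absurd hmem (List.not_mem_nil)
    · rintro ⟨h1, h2⟩
      have h2' : ((List.count x ([] : List Int) : Nat) : Int) = f := h2
      simp at h2'
      omega
  · intro f
    rw [hw]
    constructor
    · intro hco
      rw [PySem.Dict.contains_empty] at hco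
      exact absurd hco (by simp)
    · rintro ⟨h1, x, h2⟩
      have h2' : ((List.count x ([] : List Int) : Nat) : Int) = f := h2
      simp at h2'
      omega
  · intro x
    rw [hw]
    simp
  · intro hcontr
    exact absurd hcontr (lt_irrefl 0)
  · intro _
    rfl
  · rw [show 0 + 1 - k.toNat = 0 by omega]
    simp

theorem inv_step (arr : List Int) (k : Int) (hk : 1 ≤ k) (p : Nat) (hp : p < arr.length)
    (st : PySem.Dict Int Int × PySem.Dict Int (PySem.Set Int) × Int × Int)
    (h : InvA arr k p st) :
    InvA arr k (p + 1) (sumOfModesStep arr k st ((p : Nat) : Int)) := by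
  obtain ⟨hF, hC, hM1, hM2, hM0, hR⟩ := h
  have hkk : ((k.toNat : Nat) : Int) = k := Int.toNat_of_nonneg (by omega)
  set kn := k.toNat with hkn
  set W := pvWin arr kn p with hWdef
  set W' := pvWin arr kn (p+1) with hW'def
  set num := arr.getD p 0 with hnumdef
  -- re-state the inherited facts through the local abbreviations
  have hF' : ∀ x : Int, st.1.getD x 0 = ((W.count x : Nat) : Int) := fun x => by
    rw [hWdef]; exact hF x
  have hC' : CmapOK st.2.1 (fun x => ((W.count x : Nat) : Int)) := by
    rw [hWdef]; exact hC
  have hM1' : ∀ x : Int, ((W.count x : Nat) : Int) ≤ st.2.2.1 := fun x => by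
    rw [hWdef]; exact hM1 x
  have hM2' : 0 < p → ∃ x : Int, ((W.count x : Nat) : Int) = st.2.2.1 := fun hp0 => by
    rw [hWdef]; exact hM2 hp0
  have hR' : st.2.2.2 = ((List.range (p + 1 - kn)).map
      (fun s => windowMode ((arr.take (s + kn)).drop s))).sum := hR
  have hpy1 : PySem.List.pyGetD arr ((p : Nat) : Int) 0 = num := by
    rw [PySem.List.pyGetD_natCast]
  have hne' : W' ≠ [] := by
    rw [hW'def, hkn]
    exact pvWin_ne_nil arr k.toNat (p+1) (by omega) (by omega) (by omega)
  by_cases hik : kn ≤ p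
  · -- removal branch
    set out := arr.getD (p - kn) 0 with houtdef
    have hpy2 : PySem.List.pyGetD arr (((p : Nat) : Int) - k) 0 = out := by
      rw [show (((p : Nat) : Int) - k) = (((p - kn : Nat)) : Int) by omega, PySem.List.pyGetD_natCast]
    have hlist : out :: W' = W ++ [num] := by
      rw [hWdef, hW'def, houtdef, hnumdef, hkn]
      exact pvWin_succ_ge arr k.toNat p (by omega) (by omega) hp
    have houtmem : out ∈ W := by
      rw [hWdef, houtdef, hkn]
      exact pvWin_head_mem arr k.toNat p (by omega) (by omega) (by omega) (by omega)
    set gv : Int → Int := fun x => ((W.count x : Nat) : Int) + (if x = num then 1 else 0) with hgv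
    have hcnt : ∀ x : Int, ((W'.count x : Nat) : Int) = gv x - (if x = out then 1 else 0) := by
      intro x
      have hc := congrArg (List.count x) hlist
      simp only [List.count_cons, List.count_append, List.count_nil, beq_iff_eq] at hc
      simp only [hgv]
      split_ifs at hc ⊢ <;> omega
    have hgvout : 1 ≤ gv out := by
      have hcp : 0 < W.count out := List.count_pos_iff.mpr houtmem
      simp only [hgv]
      split_ifs <;> omega
    simp only [sumOfModesStep, hpy1, hpy2]
    rw [if_pos (show ((p : Nat) : Int) ≥ k by omega)]
    rw [if_pos (show ((p : Nat) : Int) ≥ k - 1 by omega)]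
    rw [hF' num]
    have hOK1 : CmapOK (cmBumpAdd st.2.1 num ((W.count num : Nat) : Int)) gv := by
      have h0 : (0:Int) ≤ (fun x => ((W.count x : Nat) : Int)) num := Int.natCast_nonneg _
      have hb := bumpAdd_ok (cmap := st.2.1) (g := fun x => ((W.count x : Nat) : Int)) (e := num) hC' h0
      refine cmapOK_congr hb ?_
      intro x
      simp only [hgv]
      by_cases hx : x = num <;> simp [hx]
    have hfout : (st.1.insert num (((W.count num : Nat) : Int) + 1)).getD out 0 = gv out := by
      rw [PySem.Dict.getD_insert]
      by_cases hx : out = num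
      · rw [if_pos hx, hx]
        simp [hgv]
      · rw [if_neg hx, hF' out]
        simp [hgv, hx]
    rw [hfout]
    have hOK2 : CmapOK (cmBumpSub (cmBumpAdd st.2.1 num ((W.count num : Nat) : Int)) out (gv out))
        (fun x => ((W'.count x : Nat) : Int)) := by
      have hb := bumpSub_ok (g := gv) hOK1 hgvout
      refine cmapOK_congr hb ?_
      intro x
      rw [hcnt x]
      by_cases hx : x = out <;> simp [hx]
    set maxf1 := max st.2.2.1 (((W.count num : Nat) : Int) + 1) with hmaxf1
    have h3 : st.2.2.1 ≤ maxf1 := le_max_left _ _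
    have h4 : ((W.count num : Nat) : Int) + 1 ≤ maxf1 := le_max_right _ _
    have hub : ∀ x : Int, ((W'.count x : Nat) : Int) ≤ maxf1 := by
      intro x
      have h2 := hcnt x
      simp only [hgv] at h2
      by_cases hxn : x = num
      · rw [hxn] at h2 ⊢
        rw [if_pos rfl] at h2
        by_cases hxo : num = out
        · rw [if_pos hxo] at h2; omega
        · rw [if_neg hxo] at h2; omega
      · rw [if_neg hxn] at h2
        have h1 := hM1' x
        by_cases hxo : x = out
        · rw [if_pos hxo] at h2; omega
        · rw [if_neg hxo] at h2; omega
    have hMF := maxf_fix (cmBumpSub (cmBumpAdd st.2.1 num ((W.count num : Nat) : Int)) out (gv out))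
      W' maxf1 hOK2 hub hne'
    unfold InvA
    simp only [← hkn, ← hW'def]
    refine ⟨?_, hOK2, hMF.1, fun _ => hMF.2, fun hcontr => absurd hcontr (by omega), ?_⟩
    · -- freq component
      intro x
      have hcore : x ≠ out →
          ((st.1.insert num (((W.count num : Nat) : Int) + 1)).insert out (gv out - 1)).getD x 0
            = ((W'.count x : Nat) : Int) := by
        intro hx
        rw [PySem.Dict.getD_insert, if_neg hx, PySem.Dict.getD_insert]
        have hcx := hcnt x
        rw [if_neg hx] at hcx
        by_cases hx2 : x = num
        · rw [if_pos hx2, hx2]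
          rw [hx2] at hcx
          simp only [hgv] at hcx
          simp at hcx
          omega
        · rw [if_neg hx2, hF' x]
          simp only [hgv] at hcx
          rw [if_neg hx2] at hcx
          omega
      by_cases hcpos : gv out - 1 > 0
      · rw [if_pos hcpos]
        by_cases hx : x = out
        · rw [hx, PySem.Dict.getD_insert, if_pos rfl]
          have hco := hcnt out
          rw [if_pos rfl] at hco
          omega
        · exact hcore hx
      · rw [if_neg hcpos, dict_getD_erase]
        by_cases hx : x = out
        · rw [if_pos hx, hx]
          have hco := hcnt out
          rw [if_pos rfl] at hco
          omega
        · rw [if_neg hx]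
          exact hcore hx
    · -- result component
      exact result_ext arr kn p _ _ st.2.2.2 hOK2 hMF.1 hMF.2 hne' (by omega) hR'
  · -- no-removal branch
    have hlist : W' = W ++ [num] := by
      rw [hWdef, hW'def, hnumdef, hkn]
      exact pvWin_succ_lt arr k.toNat p (by omega) hp
    set gv : Int → Int := fun x => ((W.count x : Nat) : Int) + (if x = num then 1 else 0) with hgv
    have hcnt : ∀ x : Int, ((W'.count x : Nat) : Int) = gv x := by
      intro x
      have hc := congrArg (List.count x) hlist
      simp only [List.count_append, List.count_cons, List.count_nil, beq_iff_eq] at hc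
      simp only [hgv]
      split_ifs at hc ⊢ <;> omega
    simp only [sumOfModesStep, hpy1]
    rw [if_neg (show ¬(((p : Nat) : Int) ≥ k) by omega)]
    rw [hF' num]
    have hOK1 : CmapOK (cmBumpAdd st.2.1 num ((W.count num : Nat) : Int))
        (fun x => ((W'.count x : Nat) : Int)) := by
      have h0 : (0:Int) ≤ (fun x => ((W.count x : Nat) : Int)) num := Int.natCast_nonneg _
      have hb := bumpAdd_ok (cmap := st.2.1) (g := fun x => ((W.count x : Nat) : Int)) (e := num) hC' h0
      refine cmapOK_congr hb ?_
      intro x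
      rw [hcnt x]
      simp only [hgv]
      by_cases hx : x = num <;> simp [hx]
    set maxf1 := max st.2.2.1 (((W.count num : Nat) : Int) + 1) with hmaxf1
    have h3 : st.2.2.1 ≤ maxf1 := le_max_left _ _
    have h4 : ((W.count num : Nat) : Int) + 1 ≤ maxf1 := le_max_right _ _
    have hub : ∀ x : Int, ((W'.count x : Nat) : Int) ≤ maxf1 := by
      intro x
      have h2 := hcnt x
      simp only [hgv] at h2
      by_cases hxn : x = num
      · rw [hxn] at h2 ⊢
        rw [if_pos rfl] at h2
        omega
      · rw [if_neg hxn] at h2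
        have h1 := hM1' x
        omega
    have hat : ∃ x : Int, ((W'.count x : Nat) : Int) = maxf1 := by
      rcases le_total st.2.2.1 (((W.count num : Nat) : Int) + 1) with hle | hge'
      · refine ⟨num, ?_⟩
        rw [hcnt num, hmaxf1, max_eq_right hle]
        simp [hgv]
      · have hppos : 0 < p := by
          by_contra hp0
          have hp0' : p = 0 := by omega
          have hz := hM0 hp0'
          omega
        obtain ⟨x₀, hx₀⟩ := hM2' hppos
        by_cases hx₀n : x₀ = num
        · refine ⟨num, ?_⟩
          rw [hcnt num, hmaxf1]
          rw [hx₀n] at hx₀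
          rw [max_eq_right (by omega)]
          simp [hgv]
        · refine ⟨x₀, ?_⟩
          rw [hcnt x₀]
          have hgx : gv x₀ = ((W.count x₀ : Nat) : Int) := by
            simp [hgv, hx₀n]
          rw [hgx, hx₀, hmaxf1, max_eq_left hge']
    have hfreq : ∀ x : Int, (st.1.insert num (((W.count num : Nat) : Int) + 1)).getD x 0
        = ((W'.count x : Nat) : Int) := by
      intro x
      rw [PySem.Dict.getD_insert, hcnt x]
      by_cases hx : x = num
      · rw [if_pos hx]
        subst hx
        simp [hgv]
      · rw [if_neg hx, hF' x]
        simp [hgv, hx]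
    unfold InvA
    simp only [← hkn, ← hW'def]
    by_cases hkp : kn = p + 1
    · rw [if_pos (show ((p : Nat) : Int) ≥ k - 1 by omega)]
      refine ⟨hfreq, hOK1, hub, fun _ => hat, fun hcontr => absurd hcontr (by omega), ?_⟩
      exact result_ext arr kn p _ _ st.2.2.2 hOK1 hub hat hne' (by omega) hR'
    · rw [if_neg (show ¬(((p : Nat) : Int) ≥ k - 1) by omega)]
      refine ⟨hfreq, hOK1, hub, fun _ => hat, fun hcontr => absurd hcontr (by omega), ?_⟩
      rw [hR', show p + 1 + 1 - kn = p + 1 - kn by omega]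

theorem inv_fold (arr : List Int) (k : Int) (hk : 1 ≤ k) (p : Nat) (hp : p ≤ arr.length) :
    InvA arr k p ((List.range p).foldl (fun st (q : Nat) => sumOfModesStep arr k st ((q : Nat) : Int))
      (PySem.Dict.empty, PySem.Dict.empty, 0, 0)) := by
  induction p with
  | zero => exact inv_init arr k hk
  | succ p ih =>
      rw [List.range_succ, List.foldl_append]
      exact inv_step arr k hk p (by omega) _ (ih (by omega))

theorem slice_eq_win (arr : List Int) (k : Int) (hk : 1 ≤ k) (s : Nat)
    (hs : s + k.toNat ≤ arr.length) :
    PySem.List.slice arr (some (s : Int)) (some ((s : Int) + k)) =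
      (arr.take (s + k.toNat)).drop s := by
  simp only [PySem.List.slice, PySem.List.clampIdx]
  rw [if_neg (show ¬((s : Int) < 0) by omega), if_neg (show ¬((s : Int) + k < 0) by omega)]
  rw [show ((s : Int)).toNat = s by omega, show ((s : Int) + k).toNat = s + k.toNat by omega]
  rw [min_eq_left (show s ≤ arr.length by omega), min_eq_left hs]
  rw [List.drop_take]

theorem sumOfModes_eq_sum (arr : List Int) (k : Int) (hk : 1 ≤ k) :
    sumOfModes arr k =
      ((List.range (arr.length + 1 - k.toNat)).map
        (fun s => windowMode ((arr.take (s + k.toNat)).drop s))).sum := by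
  have h := inv_fold arr k hk arr.length (le_refl _)
  unfold sumOfModes
  rw [PySem.List.pyRange_zero_natCast, List.foldl_map]
  exact h.2.2.2.2.2

theorem sumOfModes_alt_eq_sum (arr : List Int) (k : Int) (hk : 1 ≤ k) :
    sumOfModes_alt arr k =
      ((List.range (arr.length + 1 - k.toNat)).map
        (fun s => windowMode ((arr.take (s + k.toNat)).drop s))).sum := by
  unfold sumOfModes_alt
  rw [if_neg (show ¬ k ≤ 0 by omega)]
  by_cases hbig : k.toNat ≤ arr.length + 1
  · rw [show (arr.length : Int) - k + 1 = ((arr.length + 1 - k.toNat : Nat) : Int) by omega]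
    rw [PySem.List.pyRange_zero_natCast, List.foldl_map]
    rw [PySem.List.foldl_add, zero_add]
    refine congrArg List.sum ?_
    refine List.map_congr_left ?_
    intro s hs
    have hs' : s + k.toNat ≤ arr.length := by
      have := List.mem_range.mp hs
      omega
    rw [slice_eq_win arr k hk s hs']
  · have hneg : ¬((0 : Int) < (arr.length : Int) - k + 1) := by omega
    have hempty : PySem.List.pyRange 0 ((arr.length : Int) - k + 1) 1 = [] := by
      simp [PySem.List.pyRange, hneg]
    rw [hempty, show arr.length + 1 - k.toNat = 0 by omega]
    simp

-- ===== VERDICT (by name: the statement is the Claim_ definition above) =====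
theorem sumOfModes_spec : Claim_equal_sumOfModes := by
  intro arr k _ hpre
  unfold Spec_sumOfModes
  by_cases hk : 1 ≤ k
  · rw [sumOfModes_eq_sum arr k hk, sumOfModes_alt_eq_sum arr k hk]
  · have harr : arr = [] := by
      rcases hpre with h | h
      · exact h
      · exact absurd h hk
    subst harr
    have hA : sumOfModes ([] : List Int) k = 0 := by
      unfold sumOfModes
      have hnil : PySem.List.pyRange 0 ((List.length ([] : List Int) : Nat) : Int) 1 = [] := by decide
      rw [hnil]
      rfl
    have hB : sumOfModes_alt ([] : List Int) k = 0 := by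
      unfold sumOfModes_alt
      rw [if_pos (by omega : k ≤ 0)]
    rw [hA, hB]
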